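-- pv_equiv track=rewrite | github.com/jeffrey-hsiao/alignment-experiment | pipelines/prepare_novel_dataset.py | group_into_chunks
-- ===== SOURCE A (Python) =====
-- def group_into_chunks(paragraphs: list[str], chunk_words: int) -> list[str]:
--     """將段落合併成每塊約 chunk_words 字的文字塊。"""
--     chunks = []
--     buf, buf_words = [], 0
--     for para in paragraphs:
--         wc = len(para.split())
--         buf.append(para)
--         buf_words += wc
--         if buf_words >= chunk_words:
--             chunks.append("\n\n".join(buf))
--             buf, buf_words = [], 0
--     if buf_words >= chunk_words // 2:   # 殘餘至少半塊才保留
--         chunks.append("\n\n".join(buf))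
--     return chunks
-- ===== SOURCE B (Python) =====
-- def group_into_chunks(paragraphs: list[str], chunk_words: int) -> list[str]:
--     """Prefix-sum + binary-search chunking: precompute cumulative word counts once,
--     then for each chunk binary-search the first boundary whose cumulative count
--     reaches the target (word counts are non-negative, so the prefix sums are
--     non-decreasing and the first index with prefix[i] >= prefix[start]+chunk_words
--     is exactly the greedy flush point)."""
--     prefix = [0]
--     total = 0
--     for p in paragraphs:
--         total += len(p.split())
--         prefix.append(total)
--     n = len(paragraphs)
--
--     def first_at_least(lo, hi, target):
--         # least i in [lo, hi) with prefix[i] >= target, else hi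
--         while lo < hi:
--             mid = (lo + hi) // 2
--             if prefix[mid] >= target:
--                 hi = mid
--             else:
--                 lo = mid + 1
--         return lo
--
--     chunks = []
--     start = 0
--     while True:
--         end = first_at_least(start + 1, n + 1, prefix[start] + chunk_words)
--         if end > n:
--             break
--         chunks.append("\n\n".join(paragraphs[start:end]))
--         start = end
--     if total - prefix[start] >= chunk_words // 2:
--         chunks.append("\n\n".join(paragraphs[start:]))
--     return chunks
-- ===== Notes on version B (the rewrite author's own statement) =====
-- stated objective: alternative
-- what changed: Replaces A's single accumulate-and-flush loop with a prefix-sum array of cumulative word counts built once, after which each chunk boundary is found by binary search for the first prefix sum reaching the running target (correct because word counts are non-negative, so prefix sums are non-decreasing and the first index reaching the target coincides with A's greedy flush point).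
import Mathlib
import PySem

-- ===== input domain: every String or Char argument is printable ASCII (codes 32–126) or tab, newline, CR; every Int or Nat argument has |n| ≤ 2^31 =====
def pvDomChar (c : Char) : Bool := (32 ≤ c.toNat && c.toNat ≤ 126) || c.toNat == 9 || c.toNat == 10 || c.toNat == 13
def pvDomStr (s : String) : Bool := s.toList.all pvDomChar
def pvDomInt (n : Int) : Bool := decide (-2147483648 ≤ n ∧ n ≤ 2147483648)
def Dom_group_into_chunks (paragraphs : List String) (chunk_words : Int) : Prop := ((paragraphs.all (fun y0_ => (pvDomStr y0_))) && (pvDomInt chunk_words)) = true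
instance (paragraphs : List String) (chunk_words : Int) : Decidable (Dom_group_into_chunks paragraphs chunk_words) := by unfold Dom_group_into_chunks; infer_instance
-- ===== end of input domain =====

-- B replaces A's accumulate-and-flush loop by precomputed word-count prefix sums plus a
-- binary search for each chunk boundary (alternative algorithm, same asymptotic cost).

-- ===== PORT A =====
-- A's for-loop: state (chunks, buf, buf_words)
def gicLoop (chunk_words : Int) : List String → List String × List String × Int → List String × List String × Int
  | [], st => st
  | para :: rest, (chunks, buf, bufWords) =>
      let wc : Int := ((PySem.Str.split₀ para).length : Int)
      let buf' := buf ++ [para]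
      let w' := bufWords + wc
      if w' ≥ chunk_words then
        gicLoop chunk_words rest (chunks ++ [PySem.Str.join "\n\n" buf'], [], 0)
      else
        gicLoop chunk_words rest (chunks, buf', w')

-- A's code after the loop: keep the remainder only if at least half a chunk
def gicFinish (chunk_words : Int) (st : List String × List String × Int) : List String :=
  if st.2.2 ≥ PySem.Int.floordiv chunk_words 2 then st.1 ++ [PySem.Str.join "\n\n" st.2.1] else st.1

def group_into_chunks (paragraphs : List String) (chunk_words : Int) : List String :=
  gicFinish chunk_words (gicLoop chunk_words paragraphs ([], [], 0))

-- ===== PORT B =====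
-- len(p.split()) as an Int
def gicWc (p : String) : Int := ((PySem.Str.split₀ p).length : Int)

-- Source B's first loop: build the prefix-sum list (state (prefix, total))
def gicPrefix (paragraphs : List String) : List Int × Int :=
  paragraphs.foldl (fun st p => (st.1 ++ [st.2 + gicWc p], st.2 + gicWc p)) ([0], 0)

-- Source B's first_at_least: binary search for the least i in [lo, hi) with prefix[i] >= target, else hi
-- (prefix[mid] is always in range in Source B, so getD never takes its default; the structurally
-- decreasing fuel argument, always called with fuel >= hi - lo, is only a totality guard for
-- the while-loop — it never changes the computation)
def gicSearch (pref : List Int) (target : Int) : Nat → Nat → Nat → Nat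
  | 0, lo, _hi => lo
  | fuel + 1, lo, hi =>
      if lo < hi then
        if pref.getD ((lo + hi) / 2) 0 ≥ target then gicSearch pref target fuel lo ((lo + hi) / 2)
        else gicSearch pref target fuel ((lo + hi) / 2 + 1) hi
      else lo

-- Source B's while-True loop together with the tail test after it (reached when end > n, i.e. the
-- nil-progress break; `start` strictly increases, bounded by n)
def gicChunkLoop (paragraphs : List String) (pref : List Int) (total cw : Int) (n : Nat) : Nat → Nat → List String
  | 0, _start => []
  | fuel + 1, start =>
      let e := gicSearch pref (pref.getD start 0 + cw) (n - start) (start + 1) (n + 1)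
      if e > n then
        if total - pref.getD start 0 ≥ PySem.Int.floordiv cw 2 then
          [PySem.Str.join "\n\n" (PySem.List.slice paragraphs (some (start : Int)) none)]
        else []
      else
        PySem.Str.join "\n\n" (PySem.List.slice paragraphs (some (start : Int)) (some (e : Int))) ::
          gicChunkLoop paragraphs pref total cw n fuel e

def group_into_chunks_alt (paragraphs : List String) (chunk_words : Int) : List String :=
  let pr := gicPrefix paragraphs
  gicChunkLoop paragraphs pr.1 pr.2 chunk_words paragraphs.length (paragraphs.length + 1) 0

-- ===== PRECONDITION & SPEC =====
def Spec_group_into_chunks (paragraphs : List String) (chunk_words : Int) (out : List String) : Prop := out = group_into_chunks_alt paragraphs chunk_words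
instance (paragraphs : List String) (chunk_words : Int) (out : List String) : Decidable (Spec_group_into_chunks paragraphs chunk_words out) := by unfold Spec_group_into_chunks; infer_instance

-- ===== CLAIM (what is proved, stated in full; the proofs are below) =====
def Claim_equal_group_into_chunks : Prop := ∀ (paragraphs : List String) (chunk_words : Int), Dom_group_into_chunks paragraphs chunk_words → Spec_group_into_chunks paragraphs chunk_words (group_into_chunks paragraphs chunk_words)

-- ===== LEMMAS AND PROOFS =====

-- cumulative word count of the first j paragraphs
def Pfun (ps : List String) (j : Nat) : Int := ((ps.take j).map gicWc).sum

theorem gicPrefix_eq (ps : List String) :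
    gicPrefix ps = ((List.range (ps.length + 1)).map (Pfun ps), Pfun ps ps.length) := by
  induction ps using List.reverseRecOn with
  | nil => simp [gicPrefix, Pfun]
  | append_singleton ps p ih =>
      unfold gicPrefix at ih ⊢
      rw [List.foldl_append, ih]
      have hagree : ∀ j, j ≤ ps.length → Pfun (ps ++ [p]) j = Pfun ps j := by
        intro j hj
        rw [Pfun, Pfun, List.take_append_of_le_length hj]
      have hlast : Pfun (ps ++ [p]) (ps.length + 1) = Pfun ps ps.length + gicWc p := by
        rw [Pfun, Pfun, List.take_of_length_le (by simp), List.take_length]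
        simp
      simp only [List.foldl_cons, List.foldl_nil, List.length_append, List.length_singleton]
      rw [Prod.mk.injEq]
      refine ⟨?_, ?_⟩
      · rw [List.range_succ (n := ps.length + 1), List.map_append]
        congr 1
        · apply List.map_congr_left
          intro j hj
          exact (hagree j (by simp at hj; omega)).symm
        · simp [hlast]
      · rw [hlast]

theorem pref_getD (ps : List String) (j : Nat) (hj : j ≤ ps.length) :
    (gicPrefix ps).1.getD j 0 = Pfun ps j := by
  rw [gicPrefix_eq]
  simp [List.getD_eq_getElem?_getD, List.getElem?_map, List.getElem?_range (by omega : j < ps.length + 1)]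

theorem gicWc_nonneg (p : String) : 0 ≤ gicWc p := by simp [gicWc]


theorem Pfun_mono (ps : List String) {j k : Nat} (h : j ≤ k) : Pfun ps j ≤ Pfun ps k := by
  induction k with
  | zero =>
      have hj : j = 0 := by omega
      simp [hj]
  | succ k ih =>
      rcases Nat.lt_or_ge j (k+1) with h' | h'
      · have : Pfun ps k ≤ Pfun ps (k+1) := by
          rw [Pfun, Pfun, List.take_add_one, List.map_append, List.sum_append]
          have : 0 ≤ (ps[k]?.toList.map gicWc).sum := by
            cases hk : ps[k]? <;> simp [gicWc_nonneg]
          omega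
        have := ih (by omega)
        omega
      · have : j = k + 1 := by omega
        simp [this]

theorem Pfun_succ (ps : List String) (i : Nat) (p : String) (hp : ps[i]? = some p) :
    Pfun ps (i + 1) = Pfun ps i + gicWc p := by
  rw [Pfun, Pfun, List.take_add_one, hp]
  simp

theorem gicSearch_eq (pref : List Int) (t : Int) (k : Nat) :
    ∀ (fuel lo hi : Nat), hi - lo ≤ fuel → lo ≤ k → k ≤ hi →
      (∀ j, lo ≤ j → j < k → pref.getD j 0 < t) →
      (∀ j, k ≤ j → j < hi → t ≤ pref.getD j 0) →
      gicSearch pref t fuel lo hi = k := by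
  intro fuel
  induction fuel with
  | zero =>
      intro lo hi hd hlo hhi _ _
      simp only [gicSearch]
      omega
  | succ fuel ih =>
      intro lo hi hd hlo hhi hb ha
      simp only [gicSearch]
      by_cases hlt : lo < hi
      · rw [if_pos hlt]
        by_cases hm : pref.getD ((lo + hi) / 2) 0 ≥ t
        · rw [if_pos hm]
          have hkm : k ≤ (lo + hi) / 2 := by
            by_contra hc
            exact absurd hm (not_le.mpr (hb _ (by omega) (by omega)))
          exact ih lo ((lo + hi) / 2) (by omega) hlo hkm hb
            (fun j hj1 hj2 => ha j hj1 (by omega))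
        · rw [if_neg hm]
          have hkm : (lo + hi) / 2 < k := by
            by_contra hc
            exact hm (ha _ (by omega) (by omega))
          exact ih ((lo + hi) / 2 + 1) hi (by omega) (by omega) hhi
            (fun j hj1 hj2 => hb j (by omega) hj2) ha
      · rw [if_neg hlt]; omega

theorem gic_main (cw : Int) (full : List String) :
    ∀ (rest : List String) (i s : Nat) (chunks : List String) (fuel : Nat),
      s ≤ i → i ≤ full.length → full.drop i = rest →
      full.length + 1 - s ≤ fuel →
      (∀ j, s < j → j ≤ i → Pfun full j - Pfun full s < cw) →
      gicFinish cw (gicLoop cw rest (chunks, (full.take i).drop s, Pfun full i - Pfun full s))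
        = chunks ++ gicChunkLoop full (gicPrefix full).1 (gicPrefix full).2 cw full.length fuel s := by
  intro rest
  induction rest with
  | nil =>
      intro i s chunks fuel hsi hil hdrop hfuel hinv
      obtain ⟨f, rfl⟩ : ∃ f, fuel = f + 1 := ⟨fuel - 1, by omega⟩
      have hi : i = full.length := by
        have := List.drop_eq_nil_iff.mp hdrop
        omega
      subst hi
      have he : gicSearch (gicPrefix full).1 ((gicPrefix full).1.getD s 0 + cw)
          (full.length - s) (s + 1) (full.length + 1) = full.length + 1 := by
        apply gicSearch_eq _ _ _ _ _ _ (by omega) (by omega) (by omega)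
        · intro j hj1 hj2
          rw [pref_getD full j (by omega), pref_getD full s (by omega)]
          have := hinv j (by omega) (by omega)
          omega
        · intro j hj1 hj2; omega
      conv_rhs => rw [gicChunkLoop]
      rw [he]
      rw [if_pos (show full.length + 1 > full.length by omega)]
      simp only [gicLoop, gicFinish]
      have htot : (gicPrefix full).2 = Pfun full full.length := by rw [gicPrefix_eq]
      rw [htot, pref_getD full s (by omega)]
      rw [PySem.List.slice_from_natCast, List.take_length]
      split_ifs with h
      · rfl
      · simp
  | cons p rest ih =>
      intro i s chunks fuel hsi hil hdrop hfuel hinv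
      obtain ⟨f, rfl⟩ : ∃ f, fuel = f + 1 := ⟨fuel - 1, by omega⟩
      have hlt : i < full.length := by
        by_contra h
        rw [List.drop_eq_nil_iff.mpr (by omega)] at hdrop
        exact List.cons_ne_nil _ _ hdrop.symm
      have hget : full[i]? = some p := by
        have : (full.drop i)[0]? = some p := by rw [hdrop]; rfl
        simpa using this
      have hbuf : (full.take i).drop s ++ [p] = (full.take (i + 1)).drop s := by
        rw [List.take_add_one, hget,
            List.drop_append_of_le_length (by rw [List.length_take]; omega)]
        rfl
      have hrest : full.drop (i + 1) = rest := by
        have : (full.drop i).drop 1 = rest := by rw [hdrop]; rfl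
        simpa [List.drop_drop] using this
      have hw : Pfun full i - Pfun full s + ((PySem.Str.split₀ p).length : Int)
          = Pfun full (i + 1) - Pfun full s := by
        rw [Pfun_succ full i p hget, gicWc]; ring
      simp only [gicLoop, hw]
      split_ifs with h
      · -- flush: the binary search finds i+1
        have he : gicSearch (gicPrefix full).1 ((gicPrefix full).1.getD s 0 + cw)
            (full.length - s) (s + 1) (full.length + 1) = i + 1 := by
          apply gicSearch_eq _ _ _ _ _ _ (by omega) (by omega) (by omega)
          · intro j hj1 hj2
            rw [pref_getD full j (by omega), pref_getD full s (by omega)]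
            have := hinv j (by omega) (by omega)
            omega
          · intro j hj1 hj2
            rw [pref_getD full j (by omega), pref_getD full s (by omega)]
            have := Pfun_mono full (show i + 1 ≤ j by omega)
            omega
        rw [hbuf]
        have hempty : (full.take (i + 1)).drop (i + 1) = [] :=
          List.drop_eq_nil_iff.mpr (by simp)
        have hz : Pfun full (i + 1) - Pfun full (i + 1) = 0 := by omega
        have hrec := ih (i + 1) (i + 1)
          (chunks ++ [PySem.Str.join "\n\n" ((full.take (i + 1)).drop s)]) f
          (le_refl _) (by omega) hrest (by omega) (by omega)
        rw [hempty, hz] at hrec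
        rw [hrec]
        conv_rhs => rw [gicChunkLoop]
        rw [he]
        rw [if_neg (show ¬ (i + 1 > full.length) by omega)]
        have hjoin : PySem.Str.join "\n\n" ((full.take (i + 1)).drop s)
            = PySem.Str.join "\n\n"
                (PySem.List.slice full (some ((s : Nat) : Int)) (some (((i + 1 : Nat)) : Int))) := by
          rw [PySem.List.slice_natCast, List.drop_take]
        simp [hjoin]
      · rw [hbuf, ih (i + 1) s chunks (f + 1) (by omega) (by omega) hrest (by omega) ?_]
        intro j hj1 hj2
        rcases Nat.lt_or_ge j (i + 1) with h' | h'
        · exact hinv j hj1 (by omega)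
        · have hji : j = i + 1 := by omega
          subst hji
          omega

-- ===== VERDICT (by name: the statement is the Claim_ definition above) =====
theorem group_into_chunks_spec : Claim_equal_group_into_chunks := by
  intro paragraphs chunk_words _
  unfold Spec_group_into_chunks group_into_chunks group_into_chunks_alt
  have h := gic_main chunk_words paragraphs paragraphs 0 0 [] (paragraphs.length + 1) (le_refl _) (by omega) rfl (by omega) (by omega)
  simpa [Pfun] using h
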